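-- pv_equiv track=rewrite | github.com/bigjosh/sha-circuit | optimize-nands.py | optimize_dead_code
-- ===== SOURCE A (Python) =====
-- def optimize_dead_code(gates):
--     """Remove gates not needed for outputs."""
--     outputs = {label for label, _, _ in gates if label.startswith("OUTPUT-") or label.startswith("FINAL-H")}
--     gate_map = {label: (a, b) for label, a, b in gates}
--
--     needed = set(outputs)
--     stack = list(outputs)
--
--     while stack:
--         label = stack.pop()
--         if label not in gate_map:
--             continue
--         a, b = gate_map[label]
--         for inp in [a, b]:
--             if inp not in needed and inp in gate_map:
--                 needed.add(inp)
--                 stack.append(inp)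
--
--     return [(label, a, b) for label, a, b in gates if label in needed]
-- ===== SOURCE B (Python) =====
-- def optimize_dead_code(gates):
--     """Remove gates not needed for outputs (round-based fixpoint instead of a DFS stack)."""
--     gate_map = {label: (a, b) for label, a, b in gates}
--
--     needed = []
--     for label, _, _ in gates:
--         if (label.startswith("OUTPUT-") or label.startswith("FINAL-H")) and label not in needed:
--             needed.append(label)
--
--     for _ in range(len(gates)):
--         new = []
--         for label in needed:
--             if label in gate_map:
--                 for inp in gate_map[label]:
--                     if inp in gate_map and inp not in needed and inp not in new:
--                         new.append(inp)
--         if not new: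
--             break
--         needed.extend(new)
--
--     return [(label, a, b) for label, a, b in gates if label in needed]
-- ===== Notes on version B (the rewrite author's own statement) =====
-- stated objective: alternative
-- what changed: Replaces A's DFS worklist (a stack popped until empty, pushing fresh inputs) by a round-based fixpoint: each round scans the current needed list once, collects all fresh live inputs, and stops when a round adds nothing; the filter over gates is unchanged.
import Mathlib
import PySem

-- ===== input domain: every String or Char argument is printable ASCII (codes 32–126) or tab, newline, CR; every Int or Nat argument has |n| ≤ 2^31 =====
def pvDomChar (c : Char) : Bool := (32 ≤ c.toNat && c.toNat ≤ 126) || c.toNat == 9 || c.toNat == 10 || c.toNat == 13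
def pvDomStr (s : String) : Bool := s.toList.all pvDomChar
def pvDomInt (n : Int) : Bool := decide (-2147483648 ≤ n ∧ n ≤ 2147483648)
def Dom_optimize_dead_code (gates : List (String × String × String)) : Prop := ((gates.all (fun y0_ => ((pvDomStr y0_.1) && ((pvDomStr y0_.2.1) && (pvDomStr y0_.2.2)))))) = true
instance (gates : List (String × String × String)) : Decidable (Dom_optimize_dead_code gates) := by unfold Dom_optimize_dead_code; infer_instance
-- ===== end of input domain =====

-- B replaces A's DFS stack worklist by a round-based fixpoint scan; same returned value, no speed claim.

-- ===== PORT A =====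
-- shared by both ports (both Pythons contain the identical condition / dict comprehension)
def pvIsOut (label : String) : Bool :=
  PySem.Str.startswith label "OUTPUT-" || PySem.Str.startswith label "FINAL-H"

def pvGateMap (gates : List (String × String × String)) : PySem.Dict String (String × String) :=
  gates.foldl (fun d g => d.insert g.1 g.2) PySem.Dict.empty

-- termination-measure helper for A's while loop, and the lemmas cited by its termination proof
def pvMiss (m : PySem.Dict String (String × String)) (needed : PySem.Set String) : Nat :=
  (m.keys.filter (fun k => !(PySem.Set.contains needed k))).length

theorem pv_filter_length_lt {α : Type} (l : List α) (p q : α → Bool)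
    (himp : ∀ x, q x = true → p x = true) (k : α) (hk : k ∈ l)
    (hpk : p k = true) (hqk : q k = false) :
    (l.filter q).length < (l.filter p).length := by
  induction l with
  | nil => cases hk
  | cons a t ih =>
    have hle : (t.filter q).length ≤ (t.filter p).length :=
      List.Sublist.length_le (List.monotone_filter_right t (fun x hx => himp x hx))
    rcases List.mem_cons.1 hk with rfl | hmem
    · simp only [List.filter_cons, hpk, hqk]
      simp only [if_true, Bool.false_eq_true, if_false, List.length_cons]
      omega
    · by_cases hqa : q a = true
      · have hpa : p a = true := himp a hqa
        simp only [List.filter_cons, hqa, hpa, if_true, List.length_cons]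
        exact Nat.succ_lt_succ (ih hmem)
      · rw [Bool.not_eq_true] at hqa
        have h := ih hmem
        simp only [List.filter_cons, hqa, Bool.false_eq_true, if_false]
        by_cases hpa : p a = true
        · simp only [hpa, if_true, List.length_cons]; omega
        · rw [Bool.not_eq_true] at hpa
          simp only [hpa, Bool.false_eq_true, if_false]; exact h

theorem pvMiss_lt (m : PySem.Dict String (String × String)) (s t : PySem.Set String)
    (hsub : ∀ x : String, x ∈ s → x ∈ t)
    (k : String) (hk : (m.get? k).isSome = true)
    (hks : k ∉ s) (hkt : k ∈ t) :
    pvMiss m t < pvMiss m s := by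
  have hmem : k ∈ m.keys := by
    have h1 : m.contains k = true := by
      rw [PySem.Dict.contains_eq_isSome_get?]; exact hk
    exact (PySem.Dict.contains_iff_mem_keys m k).1 h1
  refine pv_filter_length_lt m.keys _ _ ?_ k hmem ?_ ?_
  · intro x hx
    simp only [Bool.not_eq_true', PySem.Set.contains_eq_listContains] at hx ⊢
    cases h : List.contains s x with
    | false => rfl
    | true =>
      exfalso
      have hxs : x ∈ s := List.contains_iff_mem.1 h
      have : List.contains t x = true := List.contains_iff_mem.2 (hsub x hxs)
      rw [this] at hx; cases hx
  · simp only [Bool.not_eq_true', PySem.Set.contains_eq_listContains]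
    rw [← Bool.not_eq_true]
    intro h; exact hks (List.contains_iff_mem.1 h)
  · simp only [PySem.Set.contains_eq_listContains, List.contains_iff_mem.2 hkt, Bool.not_true]

def pvLoopA (m : PySem.Dict String (String × String)) (needed : PySem.Set String)
    (stack : List String) : PySem.Set String :=
  match hs : stack.getLast? with
  | none => needed
  | some label =>
    match hm : m.get? label with
    | none => pvLoopA m needed stack.dropLast
    | some (a, b) =>
      if h1 : PySem.Set.contains needed a = false ∧ (m.get? a).isSome = true then
        if h2 : PySem.Set.contains (PySem.Set.add needed a) b = false ∧ (m.get? b).isSome = true then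
          pvLoopA m (PySem.Set.add (PySem.Set.add needed a) b) (stack.dropLast ++ [a] ++ [b])
        else
          pvLoopA m (PySem.Set.add needed a) (stack.dropLast ++ [a])
      else
        if h2 : PySem.Set.contains needed b = false ∧ (m.get? b).isSome = true then
          pvLoopA m (PySem.Set.add needed b) (stack.dropLast ++ [b])
        else
          pvLoopA m needed stack.dropLast
termination_by (pvMiss m needed, stack.length)
decreasing_by
  · have hne : stack ≠ [] := by intro h; rw [h] at hs; simp at hs
    apply Prod.Lex.right
    have hlen : 0 < stack.length := List.length_pos_of_ne_nil hne
    simp only [List.length_dropLast]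
    omega
  · apply Prod.Lex.left
    have hna : a ∉ needed := by
      intro hmem
      have := List.contains_iff_mem.2 (show a ∈ (needed : List String) from hmem)
      rw [PySem.Set.contains_eq_listContains] at h1
      rw [h1.1] at this; cases this
    refine pvMiss_lt m needed _ ?_ a h1.2 hna ?_
    · intro x hx
      rw [PySem.Set.mem_add, PySem.Set.mem_add]
      exact Or.inl (Or.inl hx)
    · rw [PySem.Set.mem_add, PySem.Set.mem_add]
      exact Or.inl (Or.inr rfl)
  · apply Prod.Lex.left
    have hna : a ∉ needed := by
      intro hmem
      have := List.contains_iff_mem.2 (show a ∈ (needed : List String) from hmem)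
      rw [PySem.Set.contains_eq_listContains] at h1
      rw [h1.1] at this; cases this
    refine pvMiss_lt m needed _ ?_ a h1.2 hna ?_
    · intro x hx; rw [PySem.Set.mem_add]; exact Or.inl hx
    · rw [PySem.Set.mem_add]; exact Or.inr rfl
  · apply Prod.Lex.left
    have hnb : b ∉ needed := by
      intro hmem
      have := List.contains_iff_mem.2 (show b ∈ (needed : List String) from hmem)
      rw [PySem.Set.contains_eq_listContains] at h2
      rw [h2.1] at this; cases this
    refine pvMiss_lt m needed _ ?_ b h2.2 hnb ?_
    · intro x hx; rw [PySem.Set.mem_add]; exact Or.inl hx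
    · rw [PySem.Set.mem_add]; exact Or.inr rfl
  · have hne : stack ≠ [] := by intro h; rw [h] at hs; simp at hs
    apply Prod.Lex.right
    have hlen : 0 < stack.length := List.length_pos_of_ne_nil hne
    simp only [List.length_dropLast]
    omega

def optimize_dead_code (gates : List (String × String × String)) : List (String × String × String) :=
  let outputs : PySem.Set String :=
    PySem.Set.ofList ((gates.filter (fun g => pvIsOut g.1)).map (fun g => g.1))
  let gate_map := pvGateMap gates
  let needed := pvLoopA gate_map outputs outputs
  gates.filter (fun g => PySem.Set.contains needed g.1)

-- ===== PORT B =====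
def pvOutStep (acc : List String) (g : String × String × String) : List String :=
  if pvIsOut g.1 && !(acc.contains g.1) then acc ++ [g.1] else acc

def pvOutputsB (gates : List (String × String × String)) : List String :=
  gates.foldl pvOutStep []

-- body of B's inner collection loop over one needed label
def pvStep (m : PySem.Dict String (String × String)) (needed : List String)
    (new : List String) (label : String) : List String :=
  match m.get? label with
  | none => new
  | some (a, b) =>
    let new1 := if (m.get? a).isSome && !(needed.contains a) && !(new.contains a)
                then new ++ [a] else new
    if (m.get? b).isSome && !(needed.contains b) && !(new1.contains b)
    then new1 ++ [b] else new1

def pvRoundNew (m : PySem.Dict String (String × String)) (needed : List String) : List String :=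
  needed.foldl (pvStep m needed) []

def pvRounds (m : PySem.Dict String (String × String)) : Nat → List String → List String
  | 0, needed => needed
  | k + 1, needed =>
    let new := pvRoundNew m needed
    if new = [] then needed else pvRounds m k (needed ++ new)

def optimize_dead_code_alt (gates : List (String × String × String)) : List (String × String × String) :=
  let gate_map := pvGateMap gates
  let needed := pvRounds gate_map gates.length (pvOutputsB gates)
  gates.filter (fun g => needed.contains g.1)

-- ===== PRECONDITION & SPEC =====
def Spec_optimize_dead_code (gates : List (String × String × String)) (out : List (String × String × String)) : Prop := out = optimize_dead_code_alt gates
instance (gates : List (String × String × String)) (out : List (String × String × String)) : Decidable (Spec_optimize_dead_code gates out) := by unfold Spec_optimize_dead_code; infer_instance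

-- ===== CLAIM (what is proved, stated in full; the proofs are below) =====
def Claim_equal_optimize_dead_code : Prop := ∀ (gates : List (String × String × String)), Dom_optimize_dead_code gates → Spec_optimize_dead_code gates (optimize_dead_code gates)

-- ===== LEMMAS AND PROOFS =====
theorem pvLoopA_eq1 (m : PySem.Dict String (String × String)) (needed : PySem.Set String)
    (stack : List String) (hs : stack.getLast? = none) : pvLoopA m needed stack = needed := by
  rw [pvLoopA]
  split
  · rfl
  · rename_i label heq; rw [hs] at heq; cases heq

theorem pvLoopA_eq2 (m : PySem.Dict String (String × String)) (needed : PySem.Set String)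
    (stack : List String) (label : String) (hs : stack.getLast? = some label)
    (hm : m.get? label = none) :
    pvLoopA m needed stack = pvLoopA m needed stack.dropLast := by
  rw [pvLoopA]
  split
  · rename_i heq; simp [hs] at heq
  · rename_i label' heq; rw [hs] at heq; injection heq with heq; subst heq
    split
    · rfl
    · rename_i a b heq'; simp [hm] at heq'

theorem pvLoopA_eq3 (m : PySem.Dict String (String × String)) (needed : PySem.Set String)
    (stack : List String) (label a b : String) (hs : stack.getLast? = some label)
    (hm : m.get? label = some (a, b))
    (h1 : PySem.Set.contains needed a = false ∧ (m.get? a).isSome = true)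
    (h2 : PySem.Set.contains (PySem.Set.add needed a) b = false ∧ (m.get? b).isSome = true) :
    pvLoopA m needed stack
      = pvLoopA m (PySem.Set.add (PySem.Set.add needed a) b) (stack.dropLast ++ [a] ++ [b]) := by
  rw [pvLoopA]
  split
  · rename_i heq; simp [hs] at heq
  · rename_i label' heq; rw [hs] at heq; injection heq with heq; subst heq
    split
    · rename_i heq'; simp [hm] at heq'
    · rename_i a' b' heq'; rw [hm] at heq'; cases heq'
      rw [dif_pos h1, dif_pos h2]

theorem pvLoopA_eq4 (m : PySem.Dict String (String × String)) (needed : PySem.Set String)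
    (stack : List String) (label a b : String) (hs : stack.getLast? = some label)
    (hm : m.get? label = some (a, b))
    (h1 : PySem.Set.contains needed a = false ∧ (m.get? a).isSome = true)
    (h2 : ¬(PySem.Set.contains (PySem.Set.add needed a) b = false ∧ (m.get? b).isSome = true)) :
    pvLoopA m needed stack = pvLoopA m (PySem.Set.add needed a) (stack.dropLast ++ [a]) := by
  rw [pvLoopA]
  split
  · rename_i heq; simp [hs] at heq
  · rename_i label' heq; rw [hs] at heq; injection heq with heq; subst heq
    split
    · rename_i heq'; simp [hm] at heq'
    · rename_i a' b' heq'; rw [hm] at heq'; cases heq'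
      rw [dif_pos h1, dif_neg h2]

theorem pvLoopA_eq5 (m : PySem.Dict String (String × String)) (needed : PySem.Set String)
    (stack : List String) (label a b : String) (hs : stack.getLast? = some label)
    (hm : m.get? label = some (a, b))
    (h1 : ¬(PySem.Set.contains needed a = false ∧ (m.get? a).isSome = true))
    (h2 : PySem.Set.contains needed b = false ∧ (m.get? b).isSome = true) :
    pvLoopA m needed stack = pvLoopA m (PySem.Set.add needed b) (stack.dropLast ++ [b]) := by
  rw [pvLoopA]
  split
  · rename_i heq; simp [hs] at heq
  · rename_i label' heq; rw [hs] at heq; injection heq with heq; subst heq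
    split
    · rename_i heq'; simp [hm] at heq'
    · rename_i a' b' heq'; rw [hm] at heq'; cases heq'
      rw [dif_neg h1, dif_pos h2]

theorem pvLoopA_eq6 (m : PySem.Dict String (String × String)) (needed : PySem.Set String)
    (stack : List String) (label a b : String) (hs : stack.getLast? = some label)
    (hm : m.get? label = some (a, b))
    (h1 : ¬(PySem.Set.contains needed a = false ∧ (m.get? a).isSome = true))
    (h2 : ¬(PySem.Set.contains needed b = false ∧ (m.get? b).isSome = true)) :
    pvLoopA m needed stack = pvLoopA m needed stack.dropLast := by
  rw [pvLoopA]
  split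
  · rename_i heq; simp [hs] at heq
  · rename_i label' heq; rw [hs] at heq; injection heq with heq; subst heq
    split
    · rename_i heq'; simp [hm] at heq'
    · rename_i a' b' heq'; rw [hm] at heq'; cases heq'
      rw [dif_neg h1, dif_neg h2]

def pvEdge (m : PySem.Dict String (String × String)) (x y : String) : Prop :=
  ∃ a b, m.get? x = some (a, b) ∧ (y = a ∨ y = b) ∧ (m.get? y).isSome = true

def pvReach (m : PySem.Dict String (String × String)) (roots : List String) (x : String) : Prop :=
  ∃ r ∈ roots, Relation.ReflTransGen (pvEdge m) r x

def pvClosed (m : PySem.Dict String (String × String)) (s : List String) : Prop :=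
  ∀ x ∈ s, ∀ y, pvEdge m x y → y ∈ s

theorem pv_reach_mem_of_closed (m : PySem.Dict String (String × String)) (roots s : List String)
    (hc : pvClosed m s) (hr : ∀ r ∈ roots, r ∈ s) (x : String) (hx : pvReach m roots x) : x ∈ s := by
  obtain ⟨r, hrr, hrt⟩ := hx
  induction hrt with
  | refl => exact hr r hrr
  | tail _ he ih => exact hc _ ih _ he

theorem pv_getLast_mem (stack : List String) (label : String)
    (hs : stack.getLast? = some label) : label ∈ stack := by
  obtain ⟨t, ht⟩ := List.getLast?_eq_some_iff.mp hs
  rw [ht]; exact List.mem_append_right t (List.mem_singleton_self label)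

theorem pvLoopA_sound (m : PySem.Dict String (String × String)) (R : String → Prop)
    (hR : ∀ x y, R x → pvEdge m x y → R y) :
    ∀ (needed : PySem.Set String) (stack : List String),
      (∀ x ∈ needed, R x) → (∀ x ∈ stack, x ∈ needed) →
      ∀ x ∈ pvLoopA m needed stack, R x := by
  intro needed stack
  induction needed, stack using pvLoopA.induct m with
  | case1 needed stack hs =>
    intro hN _ x hx
    rw [pvLoopA_eq1 m needed stack hs] at hx
    exact hN x hx
  | case2 needed stack label hs hm ih =>
    intro hN hS x hx
    rw [pvLoopA_eq2 m needed stack label hs hm] at hx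
    exact ih hN (fun y hy => hS y ((List.dropLast_sublist _).subset hy)) x hx
  | case3 needed stack label hs a b hm h1 h2 ih =>
    intro hN hS x hx
    rw [pvLoopA_eq3 m needed stack label a b hs hm h1 h2] at hx
    have hRlab : R label := hN label (hS label (pv_getLast_mem stack label hs))
    have hRa : R a := hR label a hRlab ⟨a, b, hm, Or.inl rfl, h1.2⟩
    have hRb : R b := hR label b hRlab ⟨a, b, hm, Or.inr rfl, h2.2⟩
    refine ih ?_ ?_ x hx
    · intro z hz
      rcases (PySem.Set.mem_add _ _ _).mp hz with hz' | rfl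
      · rcases (PySem.Set.mem_add _ _ _).mp hz' with hz'' | rfl
        · exact hN z hz''
        · exact hRa
      · exact hRb
    · intro z hz
      rcases List.mem_append.mp hz with hz' | hz'
      · rcases List.mem_append.mp hz' with hz'' | hz''
        · exact (PySem.Set.mem_add _ _ _).mpr (Or.inl ((PySem.Set.mem_add _ _ _).mpr (Or.inl (hS z ((List.dropLast_sublist _).subset hz'')))))
        · exact (PySem.Set.mem_add _ _ _).mpr (Or.inl ((PySem.Set.mem_add _ _ _).mpr (Or.inr (List.mem_singleton.mp hz''))))
      · exact (PySem.Set.mem_add _ _ _).mpr (Or.inr (List.mem_singleton.mp hz'))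
  | case4 needed stack label hs a b hm h1 h2 ih =>
    intro hN hS x hx
    rw [pvLoopA_eq4 m needed stack label a b hs hm h1 h2] at hx
    have hRa : R a := hR label a (hN label (hS label (pv_getLast_mem stack label hs))) ⟨a, b, hm, Or.inl rfl, h1.2⟩
    refine ih ?_ ?_ x hx
    · intro z hz
      rcases (PySem.Set.mem_add _ _ _).mp hz with hz' | rfl
      · exact hN z hz'
      · exact hRa
    · intro z hz
      rcases List.mem_append.mp hz with hz' | hz'
      · exact (PySem.Set.mem_add _ _ _).mpr (Or.inl (hS z ((List.dropLast_sublist _).subset hz')))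
      · exact (PySem.Set.mem_add _ _ _).mpr (Or.inr (List.mem_singleton.mp hz'))
  | case5 needed stack label hs a b hm h1 h2 ih =>
    intro hN hS x hx
    rw [pvLoopA_eq5 m needed stack label a b hs hm h1 h2] at hx
    have hRb : R b := hR label b (hN label (hS label (pv_getLast_mem stack label hs))) ⟨a, b, hm, Or.inr rfl, h2.2⟩
    refine ih ?_ ?_ x hx
    · intro z hz
      rcases (PySem.Set.mem_add _ _ _).mp hz with hz' | rfl
      · exact hN z hz'
      · exact hRb
    · intro z hz
      rcases List.mem_append.mp hz with hz' | hz'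
      · exact (PySem.Set.mem_add _ _ _).mpr (Or.inl (hS z ((List.dropLast_sublist _).subset hz')))
      · exact (PySem.Set.mem_add _ _ _).mpr (Or.inr (List.mem_singleton.mp hz'))
  | case6 needed stack label hs a b hm h1 h2 ih =>
    intro hN hS x hx
    rw [pvLoopA_eq6 m needed stack label a b hs hm h1 h2] at hx
    exact ih hN (fun y hy => hS y ((List.dropLast_sublist _).subset hy)) x hx

theorem pvLoopA_mono (m : PySem.Dict String (String × String)) :
    ∀ (needed : PySem.Set String) (stack : List String),
      ∀ x ∈ needed, x ∈ pvLoopA m needed stack := by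
  intro needed stack
  induction needed, stack using pvLoopA.induct m with
  | case1 needed stack hs =>
    intro x hx; rw [pvLoopA_eq1 m needed stack hs]; exact hx
  | case2 needed stack label hs hm ih =>
    intro x hx; rw [pvLoopA_eq2 m needed stack label hs hm]; exact ih x hx
  | case3 needed stack label hs a b hm h1 h2 ih =>
    intro x hx; rw [pvLoopA_eq3 m needed stack label a b hs hm h1 h2]
    exact ih x ((PySem.Set.mem_add _ _ _).mpr (Or.inl ((PySem.Set.mem_add _ _ _).mpr (Or.inl hx))))
  | case4 needed stack label hs a b hm h1 h2 ih =>
    intro x hx; rw [pvLoopA_eq4 m needed stack label a b hs hm h1 h2]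
    exact ih x ((PySem.Set.mem_add _ _ _).mpr (Or.inl hx))
  | case5 needed stack label hs a b hm h1 h2 ih =>
    intro x hx; rw [pvLoopA_eq5 m needed stack label a b hs hm h1 h2]
    exact ih x ((PySem.Set.mem_add _ _ _).mpr (Or.inl hx))
  | case6 needed stack label hs a b hm h1 h2 ih =>
    intro x hx; rw [pvLoopA_eq6 m needed stack label a b hs hm h1 h2]; exact ih x hx

theorem pv_contains_false_iff' (s : List String) (x : String) :
    PySem.Set.contains s x = false ↔ x ∉ s := by
  rw [← Bool.not_eq_true, PySem.Set.contains_eq_listContains]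
  exact not_congr List.contains_iff_mem

theorem pvLoopA_closed (m : PySem.Dict String (String × String)) :
    ∀ (needed : PySem.Set String) (stack : List String),
      (∀ x ∈ needed, x ∈ stack ∨ ∀ y, pvEdge m x y → y ∈ needed) →
      (∀ x ∈ stack, x ∈ needed) →
      pvClosed m (pvLoopA m needed stack) := by
  intro needed stack
  induction needed, stack using pvLoopA.induct m with
  | case1 needed stack hs =>
    intro hI _
    rw [pvLoopA_eq1 m needed stack hs]
    intro x hx y hy
    rcases hI x hx with hst | hcl
    · -- stack is empty since getLast? = none
      have : stack = [] := by
        cases stack with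
        | nil => rfl
        | cons c t => simp at hs
      rw [this] at hst; cases hst
    · exact hcl y hy
  | case2 needed stack label hs hm ih =>
    intro hI hS
    rw [pvLoopA_eq2 m needed stack label hs hm]
    have hsplit : stack = stack.dropLast ++ [label] := by
      obtain ⟨t, ht⟩ := List.getLast?_eq_some_iff.mp hs
      rw [ht]; simp
    refine ih ?_ (fun y hy => hS y ((List.dropLast_sublist _).subset hy))
    intro x hx
    rcases hI x hx with hst | hcl
    · rw [hsplit] at hst
      rcases List.mem_append.mp hst with h | h
      · exact Or.inl h
      · -- x = label : closed vacuously since m.get? label = none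
        have hxl : x = label := List.mem_singleton.mp h
        right
        intro y hy
        obtain ⟨a, b, hma, _, _⟩ := hy
        rw [hxl, hm] at hma; cases hma
    · exact Or.inr hcl
  | case3 needed stack label hs a b hm h1 h2 ih =>
    intro hI hS
    rw [pvLoopA_eq3 m needed stack label a b hs hm h1 h2]
    have hsplit : stack = stack.dropLast ++ [label] := by
      obtain ⟨t, ht⟩ := List.getLast?_eq_some_iff.mp hs
      rw [ht]; simp
    refine ih ?_ ?_
    · intro x hx
      rcases (PySem.Set.mem_add _ _ _).mp hx with hx' | rfl
      · rcases (PySem.Set.mem_add _ _ _).mp hx' with hx'' | rfl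
        · rcases hI x hx'' with hst | hcl
          · rw [hsplit] at hst
            rcases List.mem_append.mp hst with h | h
            · exact Or.inl (List.mem_append_left _ (List.mem_append_left _ h))
            · have hxl : x = label := List.mem_singleton.mp h
              right
              intro y hy
              obtain ⟨a', b', hma, hor, hk⟩ := hy
              rw [hxl, hm] at hma
              cases hma
              rcases hor with rfl | rfl
              · exact (PySem.Set.mem_add _ _ _).mpr (Or.inl ((PySem.Set.mem_add _ _ _).mpr (Or.inr rfl)))
              · exact (PySem.Set.mem_add _ _ _).mpr (Or.inr rfl)
          · right; intro y hy
            exact (PySem.Set.mem_add _ _ _).mpr (Or.inl ((PySem.Set.mem_add _ _ _).mpr (Or.inl (hcl y hy))))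
        · exact Or.inl (List.mem_append_left _ (List.mem_append_right _ (List.mem_singleton_self _)))
      · exact Or.inl (List.mem_append_right _ (List.mem_singleton_self _))
    · intro z hz
      rcases List.mem_append.mp hz with hz' | hz'
      · rcases List.mem_append.mp hz' with hz'' | hz''
        · exact (PySem.Set.mem_add _ _ _).mpr (Or.inl ((PySem.Set.mem_add _ _ _).mpr (Or.inl (hS z ((List.dropLast_sublist _).subset hz'')))))
        · exact (PySem.Set.mem_add _ _ _).mpr (Or.inl ((PySem.Set.mem_add _ _ _).mpr (Or.inr (List.mem_singleton.mp hz''))))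
      · exact (PySem.Set.mem_add _ _ _).mpr (Or.inr (List.mem_singleton.mp hz'))
  | case4 needed stack label hs a b hm h1 h2 ih =>
    intro hI hS
    rw [pvLoopA_eq4 m needed stack label a b hs hm h1 h2]
    have hsplit : stack = stack.dropLast ++ [label] := by
      obtain ⟨t, ht⟩ := List.getLast?_eq_some_iff.mp hs
      rw [ht]; simp
    have hbmem : ∀ hk : (m.get? b).isSome = true, b ∈ PySem.Set.add needed a := by
      intro hk
      by_contra hnb
      exact h2 ⟨pv_contains_false_iff' _ _ |>.mpr hnb, hk⟩
    refine ih ?_ ?_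
    · intro x hx
      rcases (PySem.Set.mem_add _ _ _).mp hx with hx' | rfl
      · rcases hI x hx' with hst | hcl
        · rw [hsplit] at hst
          rcases List.mem_append.mp hst with h | h
          · exact Or.inl (List.mem_append_left _ h)
          · have hxl : x = label := List.mem_singleton.mp h
            right
            intro y hy
            obtain ⟨a', b', hma, hor, hk⟩ := hy
            rw [hxl, hm] at hma
            cases hma
            rcases hor with rfl | rfl
            · exact (PySem.Set.mem_add _ _ _).mpr (Or.inr rfl)
            · exact hbmem hk
        · right; intro y hy
          exact (PySem.Set.mem_add _ _ _).mpr (Or.inl (hcl y hy))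
      · exact Or.inl (List.mem_append_right _ (List.mem_singleton_self _))
    · intro z hz
      rcases List.mem_append.mp hz with hz' | hz'
      · exact (PySem.Set.mem_add _ _ _).mpr (Or.inl (hS z ((List.dropLast_sublist _).subset hz')))
      · exact (PySem.Set.mem_add _ _ _).mpr (Or.inr (List.mem_singleton.mp hz'))
  | case5 needed stack label hs a b hm h1 h2 ih =>
    intro hI hS
    rw [pvLoopA_eq5 m needed stack label a b hs hm h1 h2]
    have hsplit : stack = stack.dropLast ++ [label] := by
      obtain ⟨t, ht⟩ := List.getLast?_eq_some_iff.mp hs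
      rw [ht]; simp
    have hamem : ∀ hk : (m.get? a).isSome = true, a ∈ needed := by
      intro hk
      by_contra hna
      exact h1 ⟨pv_contains_false_iff' _ _ |>.mpr hna, hk⟩
    refine ih ?_ ?_
    · intro x hx
      rcases (PySem.Set.mem_add _ _ _).mp hx with hx' | rfl
      · rcases hI x hx' with hst | hcl
        · rw [hsplit] at hst
          rcases List.mem_append.mp hst with h | h
          · exact Or.inl (List.mem_append_left _ h)
          · have hxl : x = label := List.mem_singleton.mp h
            right
            intro y hy
            obtain ⟨a', b', hma, hor, hk⟩ := hy
            rw [hxl, hm] at hma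
            cases hma
            rcases hor with rfl | rfl
            · exact (PySem.Set.mem_add _ _ _).mpr (Or.inl (hamem hk))
            · exact (PySem.Set.mem_add _ _ _).mpr (Or.inr rfl)
        · right; intro y hy
          exact (PySem.Set.mem_add _ _ _).mpr (Or.inl (hcl y hy))
      · exact Or.inl (List.mem_append_right _ (List.mem_singleton_self _))
    · intro z hz
      rcases List.mem_append.mp hz with hz' | hz'
      · exact (PySem.Set.mem_add _ _ _).mpr (Or.inl (hS z ((List.dropLast_sublist _).subset hz')))
      · exact (PySem.Set.mem_add _ _ _).mpr (Or.inr (List.mem_singleton.mp hz'))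
  | case6 needed stack label hs a b hm h1 h2 ih =>
    intro hI hS
    rw [pvLoopA_eq6 m needed stack label a b hs hm h1 h2]
    have hsplit : stack = stack.dropLast ++ [label] := by
      obtain ⟨t, ht⟩ := List.getLast?_eq_some_iff.mp hs
      rw [ht]; simp
    have hamem : ∀ hk : (m.get? a).isSome = true, a ∈ needed := by
      intro hk
      by_contra hna
      exact h1 ⟨pv_contains_false_iff' _ _ |>.mpr hna, hk⟩
    have hbmem : ∀ hk : (m.get? b).isSome = true, b ∈ needed := by
      intro hk
      by_contra hnb
      exact h2 ⟨pv_contains_false_iff' _ _ |>.mpr hnb, hk⟩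
    refine ih ?_ (fun y hy => hS y ((List.dropLast_sublist _).subset hy))
    intro x hx
    rcases hI x hx with hst | hcl
    · rw [hsplit] at hst
      rcases List.mem_append.mp hst with h | h
      · exact Or.inl h
      · have hxl : x = label := List.mem_singleton.mp h
        right
        intro y hy
        obtain ⟨a', b', hma, hor, hk⟩ := hy
        rw [hxl, hm] at hma
        cases hma
        rcases hor with rfl | rfl
        · exact hamem hk
        · exact hbmem hk
    · exact Or.inr hcl


-- ===== B-side lemmas =====
theorem pvRoundNew_eq (m : PySem.Dict String (String × String)) (needed : List String) :
    pvRoundNew m needed = needed.foldl (pvStep m needed) [] := rfl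

def pvFresh (m : PySem.Dict String (String × String)) (needed : List String) (x : String) : Prop :=
  (m.get? x).isSome = true ∧ x ∉ needed ∧ ∃ l ∈ needed, pvEdge m l x

theorem pv_not_contains (l : List String) (x : String) (h : (!(l.contains x)) = true) : x ∉ l := by
  intro hmem
  rw [List.contains_iff_mem.2 hmem] at h
  exact absurd h (by simp)

theorem pvStep_mono (m : PySem.Dict String (String × String)) (needed acc : List String)
    (label x : String) (hx : x ∈ acc) : x ∈ pvStep m needed acc label := by
  unfold pvStep
  cases hm : m.get? label with
  | none => exact hx
  | some p =>
    obtain ⟨a, b⟩ := p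
    simp only
    by_cases hC1 : ((m.get? a).isSome && !(needed.contains a) && !(acc.contains a)) = true
    · simp only [if_pos hC1]
      by_cases hC2 : ((m.get? b).isSome && !(needed.contains b) && !((acc ++ [a]).contains b)) = true
      · simp only [if_pos hC2]
        exact List.mem_append_left _ (List.mem_append_left _ hx)
      · simp only [if_neg hC2]
        exact List.mem_append_left _ hx
    · simp only [if_neg hC1]
      by_cases hC2 : ((m.get? b).isSome && !(needed.contains b) && !(acc.contains b)) = true
      · simp only [if_pos hC2]
        exact List.mem_append_left _ hx
      · simp only [if_neg hC2]
        exact hx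

theorem pvStep_fresh (m : PySem.Dict String (String × String)) (needed acc : List String)
    (label x : String) (hl : label ∈ needed) (hacc : ∀ z ∈ acc, pvFresh m needed z)
    (hx : x ∈ pvStep m needed acc label) : pvFresh m needed x := by
  unfold pvStep at hx
  cases hm : m.get? label with
  | none => rw [hm] at hx; exact hacc x hx
  | some p =>
    obtain ⟨a, b⟩ := p
    rw [hm] at hx
    simp only at hx
    by_cases hC1 : ((m.get? a).isSome && !(needed.contains a) && !(acc.contains a)) = true
    · simp only [if_pos hC1] at hx
      have hca : pvFresh m needed a := by
        simp only [Bool.and_eq_true] at hC1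
        exact ⟨hC1.1.1, pv_not_contains _ _ hC1.1.2, label, hl, a, b, hm, Or.inl rfl, hC1.1.1⟩
      have hacc1 : ∀ z ∈ acc ++ [a], pvFresh m needed z := by
        intro z hz
        rcases List.mem_append.mp hz with hz' | hz'
        · exact hacc z hz'
        · rw [List.mem_singleton.mp hz']; exact hca
      by_cases hC2 : ((m.get? b).isSome && !(needed.contains b) && !((acc ++ [a]).contains b)) = true
      · simp only [if_pos hC2] at hx
        rcases List.mem_append.mp hx with hx' | hx'
        · exact hacc1 x hx'
        · rw [List.mem_singleton.mp hx']
          simp only [Bool.and_eq_true] at hC2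
          exact ⟨hC2.1.1, pv_not_contains _ _ hC2.1.2, label, hl, a, b, hm, Or.inr rfl, hC2.1.1⟩
      · simp only [if_neg hC2] at hx
        exact hacc1 x hx
    · simp only [if_neg hC1] at hx
      by_cases hC2 : ((m.get? b).isSome && !(needed.contains b) && !(acc.contains b)) = true
      · simp only [if_pos hC2] at hx
        rcases List.mem_append.mp hx with hx' | hx'
        · exact hacc x hx'
        · rw [List.mem_singleton.mp hx']
          simp only [Bool.and_eq_true] at hC2
          exact ⟨hC2.1.1, pv_not_contains _ _ hC2.1.2, label, hl, a, b, hm, Or.inr rfl, hC2.1.1⟩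
      · simp only [if_neg hC2] at hx
        exact hacc x hx

theorem pvStep_self (m : PySem.Dict String (String × String)) (needed acc : List String)
    (x y : String) (he : pvEdge m x y) (hyn : y ∉ needed) : y ∈ pvStep m needed acc x := by
  obtain ⟨a, b, hma, hor, hk⟩ := he
  unfold pvStep
  rw [hma]
  simp only
  have hnc : (!(needed.contains y)) = true := by
    simp only [Bool.not_eq_true']
    rw [← Bool.not_eq_true]
    intro h; exact hyn (List.contains_iff_mem.1 h)
  have hmem1 : ∀ (w : List String), y ∈ (if (m.get? y).isSome && !(needed.contains y) && !(w.contains y)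
      then w ++ [y] else w) := by
    intro w
    by_cases hC : ((m.get? y).isSome && !(needed.contains y) && !(w.contains y)) = true
    · simp only [if_pos hC]
      exact List.mem_append_right _ (List.mem_singleton_self y)
    · simp only [if_neg hC]
      have : w.contains y = true := by
        cases h : w.contains y with
        | true => rfl
        | false => exact absurd (by rw [hk, h]; simpa using hnc) hC
      exact List.contains_iff_mem.1 this
  rcases hor with rfl | rfl
  · -- y = a
    by_cases hC1 : ((m.get? y).isSome && !(needed.contains y) && !(acc.contains y)) = true
    · simp only [if_pos hC1]
      by_cases hC2 : ((m.get? b).isSome && !(needed.contains b) && !((acc ++ [y]).contains b)) = true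
      · simp only [if_pos hC2]
        exact List.mem_append_left _ (List.mem_append_right _ (List.mem_singleton_self y))
      · simp only [if_neg hC2]
        exact List.mem_append_right _ (List.mem_singleton_self y)
    · simp only [if_neg hC1]
      have hyacc : y ∈ acc := by
        have : acc.contains y = true := by
          cases h : acc.contains y with
          | true => rfl
          | false => exact absurd (by rw [hk, h]; simpa using hnc) hC1
        exact List.contains_iff_mem.1 this
      by_cases hC2 : ((m.get? b).isSome && !(needed.contains b) && !(acc.contains b)) = true
      · simp only [if_pos hC2]
        exact List.mem_append_left _ hyacc
      · simp only [if_neg hC2]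
        exact hyacc
  · -- y = b
    by_cases hC1 : ((m.get? a).isSome && !(needed.contains a) && !(acc.contains a)) = true
    · simp only [if_pos hC1]
      exact hmem1 (acc ++ [a])
    · simp only [if_neg hC1]
      exact hmem1 acc

theorem pvStep_nodup (m : PySem.Dict String (String × String)) (needed acc : List String)
    (label : String) (h : acc.Nodup) : (pvStep m needed acc label).Nodup := by
  unfold pvStep
  cases hm : m.get? label with
  | none => exact h
  | some p =>
    obtain ⟨a, b⟩ := p
    simp only
    have happ : ∀ (w : List String) (c : String), w.Nodup → c ∉ w → (w ++ [c]).Nodup := by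
      intro w c hw hc
      simp [List.nodup_append, hw]
      intro z hz heq; subst heq; exact hc hz
    by_cases hC1 : ((m.get? a).isSome && !(needed.contains a) && !(acc.contains a)) = true
    · simp only [if_pos hC1]
      have h1 : (acc ++ [a]).Nodup := by
        simp only [Bool.and_eq_true] at hC1
        exact happ acc a h (pv_not_contains _ _ hC1.2)
      by_cases hC2 : ((m.get? b).isSome && !(needed.contains b) && !((acc ++ [a]).contains b)) = true
      · simp only [if_pos hC2]
        simp only [Bool.and_eq_true] at hC2
        exact happ _ b h1 (pv_not_contains _ _ hC2.2)
      · simp only [if_neg hC2]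
        exact h1
    · simp only [if_neg hC1]
      by_cases hC2 : ((m.get? b).isSome && !(needed.contains b) && !(acc.contains b)) = true
      · simp only [if_pos hC2]
        simp only [Bool.and_eq_true] at hC2
        exact happ _ b h (pv_not_contains _ _ hC2.2)
      · simp only [if_neg hC2]
        exact h

theorem pv_foldl_mono (m : PySem.Dict String (String × String)) (needed : List String) :
    ∀ (ls acc : List String), ∀ x ∈ acc, x ∈ ls.foldl (pvStep m needed) acc := by
  intro ls
  induction ls with
  | nil => intro acc x hx; exact hx
  | cons l t ih =>
    intro acc x hx
    exact ih _ x (pvStep_mono m needed acc l x hx)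

theorem pv_foldl_fresh (m : PySem.Dict String (String × String)) (needed : List String) :
    ∀ (ls acc : List String), (∀ l ∈ ls, l ∈ needed) → (∀ z ∈ acc, pvFresh m needed z) →
      ∀ x ∈ ls.foldl (pvStep m needed) acc, pvFresh m needed x := by
  intro ls
  induction ls with
  | nil => intro acc _ hacc x hx; exact hacc x hx
  | cons l t ih =>
    intro acc hls hacc x hx
    exact ih _ (fun z hz => hls z (List.mem_cons_of_mem l hz))
      (fun z hz => pvStep_fresh m needed acc l z (hls l (List.mem_cons_self ..)) hacc hz) x hx

theorem pv_foldl_complete (m : PySem.Dict String (String × String)) (needed : List String) :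
    ∀ (ls acc : List String), ∀ x y, x ∈ ls → pvEdge m x y → y ∉ needed →
      y ∈ ls.foldl (pvStep m needed) acc := by
  intro ls
  induction ls with
  | nil => intro acc x y hx; cases hx
  | cons l t ih =>
    intro acc x y hx he hyn
    rcases List.mem_cons.mp hx with rfl | hx'
    · exact pv_foldl_mono m needed t _ y (pvStep_self m needed acc x y he hyn)
    · exact ih _ x y hx' he hyn

theorem pv_foldl_nodup (m : PySem.Dict String (String × String)) (needed : List String) :
    ∀ (ls acc : List String), acc.Nodup → (ls.foldl (pvStep m needed) acc).Nodup := by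
  intro ls
  induction ls with
  | nil => intro acc h; exact h
  | cons l t ih => intro acc h; exact ih _ (pvStep_nodup m needed acc l h)

-- pvRoundNew facts
theorem pvRoundNew_fresh (m : PySem.Dict String (String × String)) (needed : List String) :
    ∀ x ∈ pvRoundNew m needed, pvFresh m needed x := by
  rw [pvRoundNew_eq]
  exact pv_foldl_fresh m needed needed [] (fun l hl => hl) (by intro z hz; cases hz)

theorem pvRoundNew_complete (m : PySem.Dict String (String × String)) (needed : List String)
    (x y : String) (hx : x ∈ needed) (he : pvEdge m x y) (hyn : y ∉ needed) :
    y ∈ pvRoundNew m needed := by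
  rw [pvRoundNew_eq]
  exact pv_foldl_complete m needed needed [] x y hx he hyn

theorem pvRoundNew_nodup (m : PySem.Dict String (String × String)) (needed : List String) :
    (pvRoundNew m needed).Nodup := by
  rw [pvRoundNew_eq]
  exact pv_foldl_nodup m needed needed [] List.nodup_nil

theorem pvRoundNew_nil_closed (m : PySem.Dict String (String × String)) (needed : List String)
    (h : pvRoundNew m needed = []) : pvClosed m needed := by
  intro x hx y hy
  by_cases hyn : y ∈ needed
  · exact hyn
  · have := pvRoundNew_complete m needed x y hx hy hyn
    rw [h] at this; cases this

-- pvRounds facts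
theorem pvRounds_mono (m : PySem.Dict String (String × String)) :
    ∀ (k : Nat) (needed : List String), ∀ x ∈ needed, x ∈ pvRounds m k needed := by
  intro k
  induction k with
  | zero => intro needed x hx; exact hx
  | succ n ih =>
    intro needed x hx
    rw [pvRounds]
    split
    · exact hx
    · exact ih _ x (List.mem_append_left _ hx)

theorem pvRounds_sound (m : PySem.Dict String (String × String)) (R : String → Prop)
    (hR : ∀ x y, R x → pvEdge m x y → R y) :
    ∀ (k : Nat) (needed : List String), (∀ x ∈ needed, R x) →
      ∀ x ∈ pvRounds m k needed, R x := by
  intro k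
  induction k with
  | zero => intro needed hN x hx; exact hN x hx
  | succ n ih =>
    intro needed hN x hx
    rw [pvRounds] at hx
    split at hx
    · exact hN x hx
    · refine ih _ ?_ x hx
      intro z hz
      rcases List.mem_append.mp hz with hz' | hz'
      · exact hN z hz'
      · obtain ⟨_, _, l, hl, he⟩ := pvRoundNew_fresh m needed z hz'
        exact hR l z (hN l hl) he

theorem pvRounds_nodup (m : PySem.Dict String (String × String)) :
    ∀ (k : Nat) (needed : List String), needed.Nodup → (pvRounds m k needed).Nodup := by
  intro k
  induction k with
  | zero => intro needed h; exact h
  | succ n ih =>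
    intro needed h
    rw [pvRounds]
    split
    · exact h
    · refine ih _ ?_
      refine List.Nodup.append h (pvRoundNew_nodup m needed) ?_
      intro z hz hz'
      exact (pvRoundNew_fresh m needed z hz').2.1 hz

theorem pvRounds_keys (m : PySem.Dict String (String × String)) :
    ∀ (k : Nat) (needed : List String), (∀ x ∈ needed, (m.get? x).isSome = true) →
      ∀ x ∈ pvRounds m k needed, (m.get? x).isSome = true := by
  intro k
  induction k with
  | zero => intro needed h x hx; exact h x hx
  | succ n ih =>
    intro needed h x hx
    rw [pvRounds] at hx
    split at hx
    · exact h x hx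
    · refine ih _ ?_ x hx
      intro z hz
      rcases List.mem_append.mp hz with hz' | hz'
      · exact h z hz'
      · exact (pvRoundNew_fresh m needed z hz').1

theorem pvRounds_closed_or (m : PySem.Dict String (String × String)) :
    ∀ (k : Nat) (needed : List String),
      pvClosed m (pvRounds m k needed) ∨ needed.length + k ≤ (pvRounds m k needed).length := by
  intro k
  induction k with
  | zero => intro needed; right; simp [pvRounds]
  | succ n ih =>
    intro needed
    rw [pvRounds]
    split
    · rename_i hnil
      exact Or.inl (pvRoundNew_nil_closed m needed hnil)
    · rename_i hnil
      rcases ih (needed ++ pvRoundNew m needed) with hc | hlen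
      · exact Or.inl hc
      · right
        have : 1 ≤ (pvRoundNew m needed).length := by
          cases hnew : pvRoundNew m needed with
          | nil => exact absurd hnew hnil
          | cons c t => simp
        rw [List.length_append] at hlen
        omega

-- outputs agreement and gate-map keys
theorem pv_contains_eq_false (l : List String) (x : String) (h : x ∉ l) : l.contains x = false := by
  rw [← Bool.not_eq_true]
  intro hc; exact h (List.contains_iff_mem.1 hc)

theorem pvOutputsB_go (gates : List (String × String × String)) :
    ∀ acc : PySem.Set String,
      gates.foldl pvOutStep acc
        = PySem.Set.update acc ((gates.filter (fun g => pvIsOut g.1)).map (fun g => g.1)) := by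
  induction gates with
  | nil => intro acc; simp [PySem.Set.update_nil]
  | cons g t ih =>
    intro acc
    by_cases ho : pvIsOut g.1 = true
    · have hstep : (if pvIsOut g.1 && !(acc.contains g.1) then acc ++ [g.1] else acc)
          = PySem.Set.add acc g.1 := by
        rw [PySem.Set.add_eq_ite]
        by_cases hc : g.1 ∈ acc
        · simp [ho, List.contains_iff_mem.2 hc]
        · simp [ho, pv_contains_eq_false acc g.1 hc]
      rw [List.foldl_cons, show pvOutStep acc g = PySem.Set.add acc g.1 from hstep]
      simp only [List.filter_cons, ho, if_true, List.map_cons, PySem.Set.update_cons]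
      exact ih (PySem.Set.add acc g.1)
    · have ho' : pvIsOut g.1 = false := by rw [← Bool.not_eq_true]; exact ho
      have hstep : pvOutStep acc g = acc := by
        rw [pvOutStep]
        rw [ho']
        simp
      rw [List.foldl_cons, show pvOutStep acc g = acc from hstep]
      simp only [List.filter_cons, ho', Bool.false_eq_true, if_false]
      exact ih acc

theorem pvOutputsB_eq (gates : List (String × String × String)) :
    pvOutputsB gates
      = PySem.Set.ofList ((gates.filter (fun g => pvIsOut g.1)).map (fun g => g.1)) := by
  unfold pvOutputsB
  rw [pvOutputsB_go gates [], PySem.Set.update_nil_left]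

theorem pvGateMap_keys (gates : List (String × String × String)) :
    (pvGateMap gates).keys = PySem.Set.ofList (gates.map (fun g => g.1)) := by
  unfold pvGateMap
  rw [PySem.Dict.keys_foldl_insert_key gates (fun g => g.1) (fun _ g => g.2) PySem.Dict.empty]
  rw [PySem.Dict.keys_empty, PySem.Set.update_nil_left]

theorem pv_isSome_iff (gates : List (String × String × String)) (x : String) :
    ((pvGateMap gates).get? x).isSome = true ↔ x ∈ gates.map (fun g => g.1) := by
  rw [← PySem.Dict.contains_eq_isSome_get?, PySem.Dict.contains_iff_mem_keys, pvGateMap_keys,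
    PySem.Set.mem_ofList]

-- main membership characterisations
theorem pvLoopA_mem_iff (m : PySem.Dict String (String × String)) (roots : PySem.Set String)
    (x : String) : x ∈ pvLoopA m roots roots ↔ pvReach m roots x := by
  constructor
  · intro hx
    refine pvLoopA_sound m (pvReach m roots) ?_ roots roots
      (fun z hz => ⟨z, hz, Relation.ReflTransGen.refl⟩) (fun z hz => hz) x hx
    intro u v hu he
    obtain ⟨r, hr, ht⟩ := hu
    exact ⟨r, hr, ht.tail he⟩
  · intro hx
    exact pv_reach_mem_of_closed m roots _
      (pvLoopA_closed m roots roots (fun z hz => Or.inl hz) (fun z hz => hz))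
      (fun r hr => pvLoopA_mono m roots roots r hr) x hx

theorem pvRounds_mem_iff (gates : List (String × String × String)) (x : String) :
    x ∈ pvRounds (pvGateMap gates) gates.length (pvOutputsB gates)
      ↔ pvReach (pvGateMap gates) (pvOutputsB gates) x := by
  set m := pvGateMap gates with hm
  set roots := pvOutputsB gates with hroots
  constructor
  · intro hx
    refine pvRounds_sound m (pvReach m roots) ?_ gates.length roots
      (fun z hz => ⟨z, hz, Relation.ReflTransGen.refl⟩) x hx
    intro u v hu he
    obtain ⟨r, hr, ht⟩ := hu
    exact ⟨r, hr, ht.tail he⟩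
  · intro hx
    rcases pvRounds_closed_or m gates.length roots with hc | hlen
    · exact pv_reach_mem_of_closed m roots _ hc
        (fun r hr => pvRounds_mono m gates.length roots r hr) x hx
    · -- counting: this forces roots = [], so pvReach is vacuous
      exfalso
      have hrn : roots.Nodup := by rw [hroots, pvOutputsB_eq]; exact PySem.Set.nodup_ofList _
      have hresn : (pvRounds m gates.length roots).Nodup := pvRounds_nodup m gates.length roots hrn
      have hrk : ∀ z ∈ roots, (m.get? z).isSome = true := by
        intro z hz
        rw [hroots, pvOutputsB_eq, PySem.Set.mem_ofList] at hz
        obtain ⟨g, hg, rfl⟩ := List.mem_map.mp hz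
        rw [hm, pv_isSome_iff]
        exact List.mem_map.mpr ⟨g, (List.mem_filter.mp hg).1, rfl⟩
      have hsub : pvRounds m gates.length roots ⊆ PySem.Set.ofList (gates.map (fun g => g.1)) := by
        intro z hz
        rw [PySem.Set.mem_ofList]
        exact (pv_isSome_iff gates z).mp (by rw [← hm]; exact pvRounds_keys m gates.length roots hrk z hz)
      have hlen2 : (pvRounds m gates.length roots).length
          ≤ (PySem.Set.ofList (gates.map (fun g => g.1))).length :=
        (List.subperm_of_subset hresn hsub).length_le
      have hlen3 : (PySem.Set.ofList (gates.map (fun g => g.1))).length ≤ gates.length := by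
        calc _ ≤ (gates.map (fun g => g.1)).length := PySem.Set.length_ofList_le _
          _ = gates.length := by simp
      have hr0 : roots.length = 0 := by omega
      have : roots = [] := List.eq_nil_of_length_eq_zero hr0
      obtain ⟨r, hr, _⟩ := hx
      rw [this] at hr
      cases hr

theorem pv_reach_congr (m : PySem.Dict String (String × String)) (r1 r2 : List String)
    (h : ∀ z, z ∈ r1 ↔ z ∈ r2) (x : String) : pvReach m r1 x ↔ pvReach m r2 x := by
  constructor
  · rintro ⟨r, hr, ht⟩; exact ⟨r, (h r).mp hr, ht⟩
  · rintro ⟨r, hr, ht⟩; exact ⟨r, (h r).mpr hr, ht⟩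

theorem pv_main (gates : List (String × String × String)) :
    optimize_dead_code gates = optimize_dead_code_alt gates := by
  simp only [optimize_dead_code, optimize_dead_code_alt]
  refine List.filter_congr ?_
  intro g hg
  have hmemB := pvRounds_mem_iff gates g.1
  have hmemA := pvLoopA_mem_iff (pvGateMap gates)
    (PySem.Set.ofList ((gates.filter (fun g => pvIsOut g.1)).map (fun g => g.1))) g.1
  have hroots : ∀ z : String, z ∈ pvOutputsB gates
      ↔ z ∈ PySem.Set.ofList ((gates.filter (fun g => pvIsOut g.1)).map (fun g => g.1)) := by
    intro z
    rw [pvOutputsB_eq]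
  have h1 : g.1 ∈ pvLoopA (pvGateMap gates)
        (PySem.Set.ofList ((gates.filter (fun g => pvIsOut g.1)).map (fun g => g.1)))
        (PySem.Set.ofList ((gates.filter (fun g => pvIsOut g.1)).map (fun g => g.1)))
      ↔ g.1 ∈ pvRounds (pvGateMap gates) gates.length (pvOutputsB gates) := by
    rw [hmemA, hmemB]
    exact (pv_reach_congr (pvGateMap gates) _ _ hroots g.1).symm
  rw [PySem.Set.contains_eq_listContains, Bool.eq_iff_iff]
  constructor
  · intro h
    exact List.contains_iff_mem.2 (h1.mp (List.contains_iff_mem.1 h))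
  · intro h
    exact List.contains_iff_mem.2 (h1.mpr (List.contains_iff_mem.1 h))

-- ===== VERDICT (by name: the statement is the Claim_ definition above) =====
theorem optimize_dead_code_spec : Claim_equal_optimize_dead_code := by
  intro gates _
  show optimize_dead_code gates = optimize_dead_code_alt gates
  exact pv_main gates
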